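-- pv_equiv track=rewrite | github.com/thomasfrosio/cet_toolbox | toolbox.py | _format_input_description
-- ===== SOURCE A (Python) =====
-- def _format_input_description(description, left, right):
--     """Wrap string within left and right padding."""
--
--     final_string = ''
--     string = ''
--     for i in description.split():
--         size = len(string) + len(i)
--         if size <= left + right:
--             string += ' ' + i if string else i
--         else:
--             pad = ' ' * left
--             final_string += '\n' + pad + string if final_string else string
--             string = i
--
--     if string:
--         pad = ' ' * left
--         final_string += '\n' + pad + string if final_string else string
--
--     return final_string
-- ===== SOURCE B (Python) =====
-- def _format_input_description(description, left, right):
--     """Wrap string within left and right padding."""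
--     words = description.split()
--     limit = left + right
--     lines = []
--     i = 0
--     while i < len(words):
--         # maximal munch: extend this line as far as the width allows
--         n = len(words[i])
--         k = i + 1
--         while k < len(words) and n + len(words[k]) <= limit:
--             n += 1 + len(words[k])
--             k += 1
--         lines.append(' '.join(words[i:k]))
--         i = k
--     if len(lines) < 2:
--         # nothing to pad: do not materialise the left padding
--         return lines[0] if lines else ''
--     return ('\n' + ' ' * left).join(lines)
-- ===== Notes on version B (the rewrite author's own statement) =====
-- stated objective: simpler
-- what changed: B drops A's per-word string accumulator entirely: for each line it scans ahead (maximal munch) to the last word that still fits, emits ' '.join of that word slice, and renders all '\n'+padding in one final join, instead of A's single word loop that grows the current line by concatenation and interleaves the rendering conditionals into every iteration.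
import Mathlib
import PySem

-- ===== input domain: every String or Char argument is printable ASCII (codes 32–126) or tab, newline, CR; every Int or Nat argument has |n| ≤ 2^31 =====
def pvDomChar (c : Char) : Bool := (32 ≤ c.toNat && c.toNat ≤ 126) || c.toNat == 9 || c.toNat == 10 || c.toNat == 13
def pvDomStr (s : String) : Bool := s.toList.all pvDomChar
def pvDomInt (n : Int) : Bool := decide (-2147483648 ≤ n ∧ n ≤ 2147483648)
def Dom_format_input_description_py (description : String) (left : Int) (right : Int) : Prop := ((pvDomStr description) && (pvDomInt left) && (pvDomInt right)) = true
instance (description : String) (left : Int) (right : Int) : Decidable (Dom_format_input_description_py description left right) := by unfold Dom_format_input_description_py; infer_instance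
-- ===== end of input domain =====

-- B replaces A's per-word accumulator loop by a maximal-munch pass: for each line it scans
-- ahead to the furthest word that fits, joins that slice of words, and renders all padding
-- in one final join (objective: simpler).

-- ===== PORT A =====
-- pad = ' ' * left  (Python string repetition; empty for left ≤ 0)
def fidPad (left : Int) : List Char := PySem.List.pyRepeat [' '] left

-- one iteration of A's loop over state (final_string, string)
def fidAStep (left right : Int) (st : List Char × List Char) (i : List Char) :
    List Char × List Char :=
  if (st.2.length : Int) + i.length ≤ left + right then
    (st.1, if st.2.isEmpty then i else st.2 ++ ' ' :: i)
  else
    ((if st.1.isEmpty then st.2 else st.1 ++ '\n' :: (fidPad left ++ st.2)), i)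

def format_input_description_py (description : String) (left : Int) (right : Int) : String :=
  let st := (PySem.Chars.split₀ description.toList).foldl (fidAStep left right) ([], [])
  -- trailing 'if string:' flush
  let fs := if st.2.isEmpty then st.1
            else if st.1.isEmpty then st.2 else st.1 ++ '\n' :: (fidPad left ++ st.2)
  String.mk fs

-- ===== PORT B =====
-- inner while: number of further words that still fit on a line of current width n
def fidTake (limit : Int) (n : Int) : List (List Char) → Nat
  | [] => 0
  | w :: rest =>
      if n + (w.length : Int) ≤ limit then 1 + fidTake limit (n + 1 + w.length) rest
      else 0

-- outer while: each step emits one line made of a maximal slice of words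
def fidWrap (limit : Int) : List (List Char) → List (List Char)
  | [] => []
  | w :: rest =>
      let k := fidTake limit w.length rest
      PySem.Chars.join [' '] (w :: rest.take k) :: fidWrap limit (rest.drop k)
  termination_by ws => ws.length
  decreasing_by
    simp only [List.length_drop, List.length_cons]
    omega

def format_input_description_py_alt (description : String) (left : Int) (right : Int) : String :=
  match fidWrap (left + right) (PySem.Chars.split₀ description.toList) with
  | [] => ""
  | [l] => String.mk l
  | lines => String.mk (PySem.Chars.join ('\n' :: fidPad left) lines)

-- ===== PRECONDITION & SPEC =====
def Spec_format_input_description_py (description : String) (left : Int) (right : Int) (out : String) : Prop := out = format_input_description_py_alt description left right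
instance (description : String) (left : Int) (right : Int) (out : String) : Decidable (Spec_format_input_description_py description left right out) := by unfold Spec_format_input_description_py; infer_instance

-- ===== CLAIM (what is proved, stated in full; the proofs are below) =====
def Claim_equal_format_input_description_py : Prop := ∀ (description : String) (left : Int) (right : Int), Dom_format_input_description_py description left right → Spec_format_input_description_py description left right (format_input_description_py description left right)

-- ===== LEMMAS AND PROOFS =====

-- B's match on the line list is just an optimisation of the unconditional join
lemma fid_alt_eq (description : String) (left right : Int) :
    format_input_description_py_alt description left right =
      String.mk (PySem.Chars.join ('\n' :: fidPad left)
        (fidWrap (left + right) (PySem.Chars.split₀ description.toList))) := by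
  unfold format_input_description_py_alt
  cases h : fidWrap (left + right) (PySem.Chars.split₀ description.toList) with
  | nil => simp [PySem.Chars.join_nil]; rfl
  | cons a t => cases t <;> simp [PySem.Chars.join_singleton]

-- intermediate form used only by the proof: A's loop with final_string kept as a line list
def fidBStep (left right : Int) (st : List (List Char) × List Char) (w : List Char) :
    List (List Char) × List Char :=
  if (st.2.length : Int) + w.length ≤ left + right then
    (st.1, if st.2.isEmpty then w else st.2 ++ ' ' :: w)
  else
    ((if st.2.isEmpty then st.1 else st.1 ++ [st.2]), w)

-- join over a snoc: the rendering A interleaves into its loop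
lemma fid_join_snoc (sep : List Char) (ls : List (List Char)) (s : List Char) :
    PySem.Chars.join sep (ls ++ [s]) =
      if ls.isEmpty then s else PySem.Chars.join sep ls ++ sep ++ s := by
  induction ls with
  | nil => simp [PySem.Chars.join_singleton]
  | cons a rest ih =>
    cases rest with
    | nil => simp [PySem.Chars.join_cons_cons, PySem.Chars.join_singleton]
    | cons b t =>
      simp only [List.isEmpty_cons, Bool.false_eq_true, if_false, List.cons_append] at ih
      simp [PySem.Chars.join_cons_cons, ih, List.append_assoc]

-- absorbing a space-joined word into the head of a join
lemma fid_join_absorb (a b : List Char) (t : List (List Char)) :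
    PySem.Chars.join [' '] ((a ++ ' ' :: b) :: t) = PySem.Chars.join [' '] (a :: b :: t) := by
  cases t with
  | nil => simp [PySem.Chars.join_singleton, PySem.Chars.join_cons_cons]
  | cons c t' => simp [PySem.Chars.join_cons_cons, List.append_assoc]

-- every word produced by split() is nonempty
lemma fid_split₀_go_ne_nil (s cur : List Char) (acc : List (List Char))
    (h : ∀ a ∈ acc, a ≠ []) : ∀ w ∈ PySem.Chars.split₀.go s cur acc, w ≠ [] := by
  induction s generalizing cur acc with
  | nil =>
    intro w hw
    simp only [PySem.Chars.split₀.go] at hw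
    split at hw
    · exact h w (by simpa using hw)
    · rename_i hcur
      rcases (by simpa using hw : w ∈ acc ∨ w = cur.reverse) with h1 | h1
      · exact h w h1
      · subst h1; simpa [List.isEmpty_iff] using hcur
  | cons c rest ih =>
    intro w hw
    simp only [PySem.Chars.split₀.go] at hw
    split at hw
    · split at hw
      · exact ih [] acc h w hw
      · rename_i hcur
        refine ih [] (cur.reverse :: acc) ?_ w hw
        intro a ha
        rcases List.mem_cons.mp ha with h1 | h1
        · subst h1
          simpa [List.reverse_eq_nil_iff, List.isEmpty_iff] using hcur
        · exact h a h1
    · exact ih (c :: cur) acc h w hw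

lemma fid_split₀_ne_nil (s : List Char) : ∀ w ∈ PySem.Chars.split₀ s, w ≠ [] := by
  simpa [PySem.Chars.split₀] using fid_split₀_go_ne_nil s [] [] (by simp)

-- loop invariant: A's final_string is the join of the intermediate line list, empty exactly
-- when that list is, and an empty current line only occurs while nothing has been flushed
lemma fid_loop_inv (left right : Int) (ws : List (List Char))
    (hws : ∀ w ∈ ws, w ≠ []) :
    ∀ (fs s : List Char) (ls : List (List Char)),
      fs = PySem.Chars.join ('\n' :: fidPad left) ls →
      (fs = [] ↔ ls = []) →
      (s = [] → fs = []) →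
      (ws.foldl (fidAStep left right) (fs, s)).2 = (ws.foldl (fidBStep left right) (ls, s)).2 ∧
      (ws.foldl (fidAStep left right) (fs, s)).1 =
        PySem.Chars.join ('\n' :: fidPad left) (ws.foldl (fidBStep left right) (ls, s)).1 ∧
      ((ws.foldl (fidAStep left right) (fs, s)).1 = [] ↔
        (ws.foldl (fidBStep left right) (ls, s)).1 = []) ∧
      ((ws.foldl (fidAStep left right) (fs, s)).2 = [] →
        (ws.foldl (fidAStep left right) (fs, s)).1 = []) := by
  induction ws with
  | nil => intro fs s ls h1 h2 h3; exact ⟨rfl, h1, h2, h3⟩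
  | cons w rest ih =>
    intro fs s ls h1 h2 h3
    have hw : w ≠ [] := hws w (by simp)
    have hrest : ∀ x ∈ rest, x ≠ [] := fun x hx => hws x (by simp [hx])
    simp only [List.foldl_cons]
    by_cases hc : (s.length : Int) + w.length ≤ left + right
    · -- word fits: accumulated structure unchanged, same new current line in both
      have h3' : (if s.isEmpty then w else s ++ ' ' :: w) = [] → fs = [] := by
        intro h; split at h
        · exact absurd h hw
        · simp at h
      simpa [fidAStep, fidBStep, hc] using
        ih hrest fs (if s.isEmpty then w else s ++ ' ' :: w) ls h1 h2 h3'
    · by_cases hse : s = []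
      · -- empty current line: nothing flushed yet, both states just set string := w
        have hfs : fs = [] := h3 hse
        have hls : ls = [] := h2.mp hfs
        subst hse hfs hls
        simpa [fidAStep, fidBStep, hc] using
          ih hrest [] w [] (by simp [PySem.Chars.join_nil]) (by simp)
            (fun h => absurd h hw)
      · -- overflow: A renders the line into final_string, B appends it to lines
        have h1' : (if fs.isEmpty then s else fs ++ '\n' :: (fidPad left ++ s)) =
            PySem.Chars.join ('\n' :: fidPad left) (ls ++ [s]) := by
          rw [fid_join_snoc]
          by_cases hfs : fs = []
          · have : ls = [] := h2.mp hfs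
            simp [hfs, this]
          · have hls : ls ≠ [] := fun h => hfs (h2.mpr h)
            rw [h1] at hfs
            simp [List.isEmpty_iff, hfs, hls, h1, List.append_assoc]
        have h2' : ((if fs.isEmpty then s else fs ++ '\n' :: (fidPad left ++ s)) = [] ↔
            (ls ++ [s]) = []) := by
          constructor
          · intro h; split at h
            · exact absurd h hse
            · simp at h
          · intro h; simp at h
        simpa [fidAStep, fidBStep, hc, List.isEmpty_iff, hse] using
          ih hrest (if fs.isEmpty then s else fs ++ '\n' :: (fidPad left ++ s)) w (ls ++ [s])
            h1' h2' (fun h => absurd h hw)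

-- the flushed line list of the intermediate loop is exactly B's maximal-munch wrapping
lemma fid_bstep_eq_wrap (left right : Int) (ws : List (List Char))
    (hws : ∀ w ∈ ws, w ≠ []) :
    ∀ (s : List Char) (ls : List (List Char)), s ≠ [] →
      (let st := ws.foldl (fidBStep left right) (ls, s)
       if st.2.isEmpty then st.1 else st.1 ++ [st.2]) =
      ls ++ PySem.Chars.join [' '] (s :: ws.take (fidTake (left + right) s.length ws)) ::
        fidWrap (left + right) (ws.drop (fidTake (left + right) s.length ws)) := by
  induction ws with
  | nil =>
    intro s ls hs
    simp [fidTake, fidWrap, List.isEmpty_iff, hs, PySem.Chars.join_singleton]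
  | cons w rest ih =>
    intro s ls hs
    have hw : w ≠ [] := hws w (by simp)
    have hrest : ∀ x ∈ rest, x ≠ [] := fun x hx => hws x (by simp [hx])
    have hse : s.isEmpty = false := by simp [hs]
    simp only [List.foldl_cons, fidBStep, fidTake, hse, Bool.false_eq_true, if_false]
    by_cases hc : (s.length : Int) + w.length ≤ left + right
    · have h := ih hrest (s ++ ' ' :: w) ls (by simp)
      have hlenI : ((s ++ ' ' :: w).length : Int) = (s.length : Int) + 1 + w.length := by
        simp; ring
      rw [hlenI] at h
      simp only [hc, if_true]
      rw [h, Nat.add_comm 1, List.take_succ_cons, List.drop_succ_cons, fid_join_absorb]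
    · have h := ih hrest w (ls ++ [s]) hw
      simp only [hc, if_false]
      rw [h]
      simp [List.take, List.drop, fidWrap, PySem.Chars.join_singleton]

-- ===== VERDICT (by name: the statement is the Claim_ definition above) =====
theorem format_input_description_py_spec : Claim_equal_format_input_description_py := by
  intro description left right _
  unfold Spec_format_input_description_py
  rw [fid_alt_eq]
  unfold format_input_description_py
  cases hws : PySem.Chars.split₀ description.toList with
  | nil => simp [PySem.Chars.join_nil, fidWrap]
  | cons w rest =>
    have hne : ∀ x ∈ w :: rest, x ≠ [] := by
      rw [← hws]; exact fid_split₀_ne_nil _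
    have hw : w ≠ [] := hne w (by simp)
    have hrest : ∀ x ∈ rest, x ≠ [] := fun x hx => hne x (by simp [hx])
    -- the first iteration of A's loop sends ([], []) to ([], w)
    have hfirst : fidAStep left right ([], []) w = ([], w) := by
      simp [fidAStep]
    obtain ⟨h1, h2, h3, h4⟩ := fid_loop_inv left right rest hrest [] w []
      (by simp [PySem.Chars.join_nil]) (by simp) (fun h => absurd h hw)
    have hflush := fid_bstep_eq_wrap left right rest hrest w [] hw
    simp only [List.foldl_cons, hfirst]
    simp only [List.nil_append] at hflush
    -- rewrite A's flushed result as join of the intermediate line list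
    by_cases h2e : (rest.foldl (fidAStep left right) ([], w)).2 = []
    · -- current line empty at the end: A returns final_string, B's flush is just the lines
      have hA1 : (rest.foldl (fidAStep left right) ([], w)).1 = [] := h4 h2e
      have hB2 : (rest.foldl (fidBStep left right) ([], w)).2 = [] := h1 ▸ h2e
      have hBl : (rest.foldl (fidBStep left right) ([], w)).1 = [] := h3.mp hA1
      simp only [List.isEmpty_iff, h2e, if_true, hA1]
      rw [show fidWrap (left + right) (w :: rest) =
            PySem.Chars.join [' ']
                (w :: rest.take (fidTake (left + right) w.length rest)) ::
              fidWrap (left + right)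
                (rest.drop (fidTake (left + right) w.length rest)) from by
        rw [fidWrap]]
      rw [← hflush]
      simp [hB2, hBl, PySem.Chars.join_nil]
    · have hB2 : (rest.foldl (fidBStep left right) ([], w)).2 ≠ [] := h1 ▸ h2e
      simp only [List.isEmpty_iff, h2e, if_false]
      rw [show fidWrap (left + right) (w :: rest) =
            PySem.Chars.join [' ']
                (w :: rest.take (fidTake (left + right) w.length rest)) ::
              fidWrap (left + right)
                (rest.drop (fidTake (left + right) w.length rest)) from by
        rw [fidWrap]]
      rw [← hflush]
      simp only [List.isEmpty_iff, hB2, if_false]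
      rw [fid_join_snoc, h1, h2]
      by_cases hA1 : (rest.foldl (fidAStep left right) ([], w)).1 = []
      · have hBl : (rest.foldl (fidBStep left right) ([], w)).1 = [] := h3.mp hA1
        simp [hBl, PySem.Chars.join_nil]
      · have hBl : (rest.foldl (fidBStep left right) ([], w)).1 ≠ [] :=
          fun h => hA1 (h3.mpr h)
        have hne2 : PySem.Chars.join ('\n' :: fidPad left)
            (rest.foldl (fidBStep left right) ([], w)).1 ≠ [] := h2 ▸ hA1
        simp [List.isEmpty_iff, hBl, hne2, List.append_assoc]
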